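-- pv_equiv track=rewrite | github.com/ivorbosloper/aoc | 2022/advent22.py | parse
-- ===== SOURCE A (Python) =====
-- def parse(input):
--     maze = input.split('\n')
--     instructions = maze.pop()
--     maze.pop()
--     y_min_max = [[None, -100000] for c in maze[0]]
--     x_min_max = []
--     for y, row in enumerate(maze):
--         mn, mx = None, None
--         for x, c in enumerate(row):
--             if c != ' ':
--                 if mn is None:
--                     mn = x
--                 mx = x
--
--                 ymm = y_min_max[x]
--                 if ymm[0] is None:
--                     ymm[0] = y
--                 ymm[1] = y
--         x_min_max.append((mn, mx))
--
--     return maze, instructions, x_min_max, y_min_max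
-- ===== SOURCE B (Python) =====
-- def parse(input):
--     # Two separate passes instead of A's single fused nested loop:
--     # pass 1 computes each row's horizontal bounds in closed form via lstrip/rstrip,
--     # pass 2 scans rows updating only the per-column vertical bounds.
--     maze = input.split('\n')
--     instructions = maze.pop()
--     maze.pop()
--     x_min_max = [
--         (len(row) - len(row.lstrip(' ')), len(row.rstrip(' ')) - 1)
--         if row.lstrip(' ') else (None, None)
--         for row in maze
--     ]
--     y_min_max = [[None, -100000] for c in maze[0]]
--     for y, row in enumerate(maze):
--         for x, c in enumerate(row):
--             if c != ' ':
--                 ymm = y_min_max[x]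
--                 if ymm[0] is None:
--                     ymm[0] = y
--                 ymm[1] = y
--     return maze, instructions, x_min_max, y_min_max
-- ===== Notes on version B (the rewrite author's own statement) =====
-- stated objective: alternative
-- what changed: A's single fused nested loop that simultaneously accumulates per-row (mn,mx) and mutates per-column y bounds is split into two independent passes: row bounds computed in closed form from lstrip(' ')/rstrip(' ') lengths, then a separate scan updating only the per-column y bounds.
-- outside the precondition, e.g. on parse('\n'): A raises IndexError, B raises IndexError; on parse(' '): A raises IndexError, B raises IndexError
import Mathlib
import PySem

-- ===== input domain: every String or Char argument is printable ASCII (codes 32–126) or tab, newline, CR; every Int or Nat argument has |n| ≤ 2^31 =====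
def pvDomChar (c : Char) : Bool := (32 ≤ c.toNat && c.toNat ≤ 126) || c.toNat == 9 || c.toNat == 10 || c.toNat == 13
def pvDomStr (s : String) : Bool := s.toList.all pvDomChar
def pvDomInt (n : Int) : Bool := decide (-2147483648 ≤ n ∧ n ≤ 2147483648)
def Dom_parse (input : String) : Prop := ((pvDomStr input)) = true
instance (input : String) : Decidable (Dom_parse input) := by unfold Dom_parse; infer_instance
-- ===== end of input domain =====

-- B replaces A's single fused nested loop by two independent passes (closed-form lstrip/rstrip
-- row bounds, then a column-bounds-only scan); equal return value on Pre_, A mutates nothing.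

-- ===== PORT A =====
-- the in-place update of the 2-element list y_min_max[x] (this code is verbatim in both Pythons)
def pvUpdY (y : Int) (g : List (List (Option Int))) (x : Int) : List (List (Option Int)) :=
  let ymm := PySem.List.pyGetD g x []
  let ymm := if PySem.List.pyGetD ymm 0 none = none then PySem.List.pySetD ymm 0 (some y) else ymm
  let ymm := PySem.List.pySetD ymm 1 (some y)
  PySem.List.pySetD g x ymm

def parse (input : String) : List String × String × (List (Option Int × Option Int)) × List (List (Option Int)) :=
  let maze0 := (PySem.Str.split? input "\n").getD []      -- split with sep ≠ "" never fails
  let instructions := PySem.List.pyGetD maze0 (-1) ""     -- maze.pop(): split's result is never empty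
  let maze := maze0.dropLast.dropLast                     -- that pop, plus the second maze.pop() (raises with < 2 '\n': outside Pre_)
  let ymm0 : List (List (Option Int)) := (PySem.List.pyGetD maze 0 "").toList.map (fun _ => [none, some (-100000)])
  let r := (PySem.List.enumerate maze 0).foldl
    (fun st p =>
      let inner := (PySem.List.enumerate p.2.toList 0).foldl
        (fun (s : Option Int × Option Int × List (List (Option Int))) q =>
          if q.2 ≠ ' ' then
            ((if s.1 = none then some q.1 else s.1), some q.1, pvUpdY p.1 s.2.2 q.1)
          else s)
        (none, none, st.2)
      (st.1 ++ [(inner.1, inner.2.1)], inner.2.2))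
    (([], ymm0) : List (Option Int × Option Int) × List (List (Option Int)))
  (maze, instructions, r.1, r.2)

-- ===== PORT B =====
-- lstrip(' ') / rstrip(' ') are ported by hand as dropWhile (· == ' ') on the char list
-- (resp. on its reverse): exact — they remove exactly the leading/trailing ' ' characters.
def parse_alt (input : String) : List String × String × (List (Option Int × Option Int)) × List (List (Option Int)) :=
  let maze0 := (PySem.Str.split? input "\n").getD []
  let instructions := PySem.List.pyGetD maze0 (-1) ""
  let maze := maze0.dropLast.dropLast
  let x_min_max := maze.map (fun row =>
    if (row.toList.dropWhile (· == ' ')).isEmpty then ((none : Option Int), (none : Option Int))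
    else (some ((row.toList.length : Int) - (row.toList.dropWhile (· == ' ')).length),
          some (((row.toList.reverse.dropWhile (· == ' ')).length : Int) - 1)))
  let y_min_max := (PySem.List.enumerate maze 0).foldl
    (fun g p => (PySem.List.enumerate p.2.toList 0).foldl
      (fun g q => if q.2 ≠ ' ' then pvUpdY p.1 g q.1 else g) g)
    ((PySem.List.pyGetD maze 0 "").toList.map (fun _ => ([none, some (-100000)] : List (Option Int))))
  (maze, instructions, x_min_max, y_min_max)

-- ===== PRECONDITION & SPEC =====
-- Pre_ excludes exactly the inputs where Python A raises: fewer than two '\n' characters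
-- (pop / maze[0] IndexError), or a non-space character in some maze row at a column
-- index ≥ len(maze[0]) (y_min_max[x] IndexError).
def Pre_parse (input : String) : Prop :=
  let lines := (PySem.Str.split? input "\n").getD []
  3 ≤ lines.length ∧
  ∀ row ∈ lines.dropLast.dropLast, ∀ q ∈ PySem.List.enumerate row.toList 0,
    q.2 ≠ ' ' → q.1 < ((PySem.List.pyGetD lines.dropLast.dropLast 0 "").toList.length : Int)
instance (input : String) : Decidable (Pre_parse input) := by unfold Pre_parse; infer_instance

def pvWitness_parse : String := " #.\n#\n\nR2L1"

def Spec_parse (input : String) (out : List String × String × (List (Option Int × Option Int)) × List (List (Option Int))) : Prop := out = parse_alt input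
instance (input : String) (out : List String × String × (List (Option Int × Option Int)) × List (List (Option Int))) : Decidable (Spec_parse input out) := by unfold Spec_parse; infer_instance

-- ===== CLAIM (what is proved, stated in full; the proofs are below) =====
def Claim_equal_parse : Prop := ∀ (input : String), Dom_parse input → Pre_parse input → Spec_parse input (parse input)

-- ===== LEMMAS AND PROOFS =====

-- named forms of the loop bodies appearing in the two ports
def pvStepMn (s : Option Int × Option Int) (q : Int × Char) : Option Int × Option Int :=
  if q.2 ≠ ' ' then ((if s.1 = none then some q.1 else s.1), some q.1) else s

def pvStepG (y : Int) (g : List (List (Option Int))) (q : Int × Char) : List (List (Option Int)) :=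
  if q.2 ≠ ' ' then pvUpdY y g q.1 else g

def pvStepA (y : Int) (s : Option Int × Option Int × List (List (Option Int))) (q : Int × Char) :
    Option Int × Option Int × List (List (Option Int)) :=
  if q.2 ≠ ' ' then ((if s.1 = none then some q.1 else s.1), some q.1, pvUpdY y s.2.2 q.1) else s

def pvRowA (st : List (Option Int × Option Int) × List (List (Option Int))) (p : Int × String) :
    List (Option Int × Option Int) × List (List (Option Int)) :=
  let inner := (PySem.List.enumerate p.2.toList 0).foldl (pvStepA p.1) (none, none, st.2)
  (st.1 ++ [(inner.1, inner.2.1)], inner.2.2)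

def pvRowG (g : List (List (Option Int))) (p : Int × String) : List (List (Option Int)) :=
  (PySem.List.enumerate p.2.toList 0).foldl (pvStepG p.1) g

def pvMnMx (cs : List Char) : Option Int × Option Int :=
  (PySem.List.enumerate cs 0).foldl pvStepMn (none, none)

-- A's inner fold splits into the (mn,mx) fold and the y_min_max fold
theorem pv_inner_split (y : Int) (l : List (Int × Char)) (a b : Option Int) (g : List (List (Option Int))) :
    l.foldl (pvStepA y) (a, b, g)
      = ((l.foldl pvStepMn (a, b)).1, (l.foldl pvStepMn (a, b)).2, l.foldl (pvStepG y) g) := by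
  induction l generalizing a b g with
  | nil => rfl
  | cons q l ih =>
    simp only [List.foldl_cons]
    by_cases h : q.2 = ' '
    · rw [show pvStepA y (a, b, g) q = (a, b, g) from by simp [pvStepA, h],
        show pvStepMn (a, b) q = (a, b) from by simp [pvStepMn, h],
        show pvStepG y g q = g from by simp [pvStepG, h]]
      exact ih a b g
    · rw [show pvStepA y (a, b, g) q
            = ((if a = none then some q.1 else a), some q.1, pvUpdY y g q.1) from by simp [pvStepA, h],
        show pvStepMn (a, b) q = ((if a = none then some q.1 else a), some q.1) from by simp [pvStepMn, h],
        show pvStepG y g q = pvUpdY y g q.1 from by simp [pvStepG, h]]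
      exact ih _ _ _

-- A's outer fold splits into the x_min_max map and the y_min_max fold
theorem pv_outer_split (rows : List (Int × String)) (acc : List (Option Int × Option Int)) (g : List (List (Option Int))) :
    rows.foldl pvRowA (acc, g)
      = (acc ++ rows.map (fun p => pvMnMx p.2.toList), rows.foldl pvRowG g) := by
  induction rows generalizing acc g with
  | nil => simp
  | cons p rows ih =>
    simp only [List.foldl_cons, List.map_cons]
    rw [show pvRowA (acc, g) p = (acc ++ [pvMnMx p.2.toList], pvRowG g p) from by
      simp only [pvRowA, pv_inner_split, pvMnMx, pvRowG]]
    rw [ih, List.append_assoc]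
    rfl

-- a row is all spaces iff its reverse is
theorem pv_empty_rev (cs : List Char) :
    (cs.reverse.dropWhile (· == ' ')).isEmpty = (cs.dropWhile (· == ' ')).isEmpty := by
  rw [Bool.eq_iff_iff]
  simp only [List.isEmpty_iff, List.dropWhile_eq_nil_iff]
  constructor <;> intro h x hx <;> exact h x (by simpa using hx)

-- closed form of the (mn, mx) fold: leading-space count and last non-space index
theorem pv_mnmx_closed (cs : List Char) (s : Int) (a b : Option Int) :
    (PySem.List.enumerate cs s).foldl pvStepMn (a, b)
    = if (cs.dropWhile (· == ' ')).isEmpty then (a, b)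
      else ((if a = none then some (s + ((cs.length : Int) - (cs.dropWhile (· == ' ')).length)) else a),
            some (s + ((cs.reverse.dropWhile (· == ' ')).length : Int) - 1)) := by
  induction cs generalizing s a b with
  | nil => simp [PySem.List.enumerate]
  | cons c cs ih =>
    rw [PySem.List.enumerate_cons, List.foldl_cons]
    by_cases hc : c = ' '
    · rw [show pvStepMn (a, b) (s, c) = (a, b) from by simp [pvStepMn, hc], ih]
      have hd : (c :: cs).dropWhile (· == ' ') = cs.dropWhile (· == ' ') := by
        simp [hc]
      by_cases he : (cs.dropWhile (· == ' ')).isEmpty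
      · simp [hd, he]
      · have he' : ¬(cs.reverse.dropWhile (· == ' ')).isEmpty = true := by
          rw [pv_empty_rev]; exact he
        have hrev : (c :: cs).reverse.dropWhile (· == ' ')
            = cs.reverse.dropWhile (· == ' ') ++ [c] := by
          rw [List.reverse_cons, List.dropWhile_append, if_neg he']
        rw [hd, if_neg he, if_neg he]
        simp only [hrev, List.length_append, List.length_cons, List.length_nil, Prod.mk.injEq]
        refine ⟨?_, ?_⟩
        · split_ifs with ha
          · simp only [Option.some.injEq]; push_cast; ring
          · rfl
        · simp only [Option.some.injEq]; push_cast; ring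
    · rw [show pvStepMn (a, b) (s, c) = ((if a = none then some s else a), some s) from by
        simp [pvStepMn, hc], ih]
      have hd : (c :: cs).dropWhile (· == ' ') = c :: cs := by
        simp [hc]
      rw [hd, if_neg (by simp : ¬(c :: cs).isEmpty = true)]
      by_cases he : (cs.dropWhile (· == ' ')).isEmpty
      · have he' : (cs.reverse.dropWhile (· == ' ')).isEmpty = true := by
          rw [pv_empty_rev]; exact he
        have hrev : (c :: cs).reverse.dropWhile (· == ' ') = [c] := by
          rw [List.reverse_cons, List.dropWhile_append, if_pos he']
          simp [hc]
        rw [if_pos he]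
        simp only [hrev, List.length_cons, List.length_nil, Prod.mk.injEq]
        refine ⟨?_, ?_⟩
        · split_ifs with ha
          · simp only [Option.some.injEq]; push_cast; ring
          · rfl
        · simp only [Option.some.injEq]; push_cast; ring
      · have he' : ¬(cs.reverse.dropWhile (· == ' ')).isEmpty = true := by
          rw [pv_empty_rev]; exact he
        have hrev : (c :: cs).reverse.dropWhile (· == ' ')
            = cs.reverse.dropWhile (· == ' ') ++ [c] := by
          rw [List.reverse_cons, List.dropWhile_append, if_neg he']
        have hne : (cs.reverse.dropWhile (· == ' ')).length ≠ 0 := by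
          simpa [List.isEmpty_iff, List.length_eq_zero_iff] using he'
        rw [if_neg he]
        simp only [hrev, List.length_append, List.length_cons, List.length_nil, Prod.mk.injEq]
        refine ⟨?_, ?_⟩
        · by_cases ha : a = none
          · simp only [ha]
            simp
          · simp [ha]
        · simp only [Option.some.injEq]; push_cast; omega

-- ===== VERDICT (by name: the statement is the Claim_ definition above) =====
theorem parse_spec : Claim_equal_parse := by
  intro input _ _
  unfold Spec_parse
  simp only [parse, parse_alt]
  rw [show (fun (st : List (Option Int × Option Int) × List (List (Option Int))) (p : Int × String) =>
      let inner := (PySem.List.enumerate p.2.toList 0).foldl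
        (fun (s : Option Int × Option Int × List (List (Option Int))) q =>
          if q.2 ≠ ' ' then
            ((if s.1 = none then some q.1 else s.1), some q.1, pvUpdY p.1 s.2.2 q.1)
          else s)
        (none, none, st.2)
      (st.1 ++ [(inner.1, inner.2.1)], inner.2.2)) = pvRowA from rfl]
  rw [show (fun (g : List (List (Option Int))) (p : Int × String) =>
      (PySem.List.enumerate p.2.toList 0).foldl
        (fun g q => if q.2 ≠ ' ' then pvUpdY p.1 g q.1 else g) g) = pvRowG from rfl]
  rw [pv_outer_split]
  refine Prod.ext rfl (Prod.ext rfl (Prod.ext ?_ rfl))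
  simp only [List.nil_append]
  rw [show (fun (p : Int × String) => pvMnMx p.2.toList)
      = (fun (row : String) => pvMnMx row.toList) ∘ Prod.snd from rfl,
    ← List.map_map, PySem.List.map_snd_enumerate]
  apply List.map_congr_left
  intro row _
  rw [show pvMnMx row.toList = (PySem.List.enumerate row.toList 0).foldl pvStepMn (none, none) from rfl,
    pv_mnmx_closed]
  simp
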